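-- pv_equiv track=rewrite | github.com/smanitas/BioinformaticsTasks | src/Bioinformatics II/4 week/gen_4.2.py | select_leaderboard
-- ===== SOURCE A (Python) =====
-- def select_leaderboard(leaderboard, n):
--     sorted_leaderboard = sorted(leaderboard, key=lambda x: x[1], reverse=True)
--     if len(sorted_leaderboard) <= n:
--         return sorted_leaderboard
--     threshold = sorted_leaderboard[n - 1][1]
--     selected_leaderboard = []
--     for peptide, score in sorted_leaderboard:
--         if score >= threshold:
--             selected_leaderboard.append((peptide, score))
--     return selected_leaderboard
-- ===== SOURCE B (Python) =====
-- def select_leaderboard(leaderboard, n):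
--     sorted_leaderboard = sorted(leaderboard, key=lambda x: x[1], reverse=True)
--     if len(sorted_leaderboard) <= n:
--         return sorted_leaderboard
--     # single scan with early break: keep entries while quota not reached,
--     # then finish the tied group whose score equals the last kept score
--     result = []
--     count = 0
--     prev = None
--     for peptide, score in sorted_leaderboard:
--         if count >= n and score != prev:
--             break
--         result.append((peptide, score))
--         count += 1
--         prev = score
--     return result
-- ===== Notes on version B (the rewrite author's own statement) =====
-- stated objective: alternative
-- what changed: Instead of indexing sorted[n-1] for a threshold and re-filtering the whole sorted list, B makes one scan over the sorted list with an early break, keeping entries until the quota n is reached and then only finishing the current tied group.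
-- intended difference: For n <= 0 with -len(leaderboard) < n (and the list longer than n), A's sorted[n-1] index wraps around to the end of the list, so A returns a nonempty tail-threshold selection (the whole list for n=0); B returns [], the intended 'top 0 or fewer' answer. — e.g. on select_leaderboard([("a", 1), ("b", 2)], -1): A returns [("b", 2)], B returns []
import Mathlib
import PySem

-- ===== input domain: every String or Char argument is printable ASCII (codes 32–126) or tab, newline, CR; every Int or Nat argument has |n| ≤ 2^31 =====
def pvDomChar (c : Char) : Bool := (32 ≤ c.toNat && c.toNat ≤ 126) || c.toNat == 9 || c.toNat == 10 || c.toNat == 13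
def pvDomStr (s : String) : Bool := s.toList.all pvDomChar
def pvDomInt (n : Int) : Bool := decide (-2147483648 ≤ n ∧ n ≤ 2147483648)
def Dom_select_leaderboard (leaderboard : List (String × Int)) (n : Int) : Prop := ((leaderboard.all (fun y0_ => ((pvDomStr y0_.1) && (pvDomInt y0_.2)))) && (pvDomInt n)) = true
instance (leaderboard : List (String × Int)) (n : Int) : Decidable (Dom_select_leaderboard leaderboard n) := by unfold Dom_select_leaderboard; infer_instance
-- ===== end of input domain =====

-- B replaces A's threshold-index-then-refilter with one early-exiting scan of the sorted list
-- (alternative decomposition, same cost); for n ≤ 0 B returns [] where A's negative index wraps around.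

-- ===== PORT A =====
def select_leaderboard (leaderboard : List (String × Int)) (n : Int) : List (String × Int) :=
  let s := PySem.List.sorted leaderboard (fun x => x.2) true
  if (s.length : Int) ≤ n then s
  else
    match PySem.List.pyGet? s (n - 1) with
    | none => []  -- Python raises IndexError here; excluded by Pre_
    | some q =>
      let threshold := q.2
      s.foldl (fun acc x => if x.2 ≥ threshold then acc ++ [(x.1, x.2)] else acc) []

-- ===== PORT B =====
-- the for-loop of Source B with its break, as structural recursion over the sorted list
def pvBLoop (n : Int) (count : Int) (prev : Option Int) : List (String × Int) → List (String × Int)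
  | [] => []
  | (p, sc) :: rest =>
    if n ≤ count ∧ prev ≠ some sc then []
    else (p, sc) :: pvBLoop n (count + 1) (some sc) rest

def select_leaderboard_alt (leaderboard : List (String × Int)) (n : Int) : List (String × Int) :=
  let s := PySem.List.sorted leaderboard (fun x => x.2) true
  if (s.length : Int) ≤ n then s
  else pvBLoop n 0 none s

-- ===== PRECONDITION & SPEC =====
-- Pre_ excludes exactly the inputs where A raises IndexError on sorted[n-1] (n ≤ -len with the early return not taken).
def Pre_select_leaderboard (leaderboard : List (String × Int)) (n : Int) : Prop :=
  (leaderboard.length : Int) ≤ n ∨ -(leaderboard.length : Int) < n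
instance (leaderboard : List (String × Int)) (n : Int) : Decidable (Pre_select_leaderboard leaderboard n) := by unfold Pre_select_leaderboard; infer_instance
def pvWitness_select_leaderboard : (List (String × Int)) × Int := ([("a", 1)], 1)

-- For n ≤ 0 with -len(leaderboard) < n, A's sorted[n-1] index wraps around to the end of the list, so A
-- returns a nonempty tail-threshold selection (the whole list for n = 0); B returns [], the intended answer.
def D_select_leaderboard (leaderboard : List (String × Int)) (n : Int) : Prop :=
  n ≤ 0 ∧ -(leaderboard.length : Int) < n
instance (leaderboard : List (String × Int)) (n : Int) : Decidable (D_select_leaderboard leaderboard n) := by unfold D_select_leaderboard; infer_instance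

def Spec_select_leaderboard (leaderboard : List (String × Int)) (n : Int) (out : List (String × Int)) : Prop := ¬ D_select_leaderboard leaderboard n → out = select_leaderboard_alt leaderboard n
instance (leaderboard : List (String × Int)) (n : Int) (out : List (String × Int)) : Decidable (Spec_select_leaderboard leaderboard n out) := by unfold Spec_select_leaderboard; infer_instance

def pvDiffWitness_select_leaderboard : (List (String × Int)) × Int := ([("a", 1), ("b", 2)], -1)
def pvDiffWitnessOut_select_leaderboard : (List (String × Int)) × (List (String × Int)) := ([("b", 2)], [])

-- ===== CLAIM (what is proved, stated in full; the proofs are below) =====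
def Claim_unchanged_select_leaderboard : Prop := ∀ (leaderboard : List (String × Int)) (n : Int), Dom_select_leaderboard leaderboard n → Pre_select_leaderboard leaderboard n → Spec_select_leaderboard leaderboard n (select_leaderboard leaderboard n)
def Claim_changed_select_leaderboard : Prop := Dom_select_leaderboard (pvDiffWitness_select_leaderboard.1) (pvDiffWitness_select_leaderboard.2) ∧ Pre_select_leaderboard (pvDiffWitness_select_leaderboard.1) (pvDiffWitness_select_leaderboard.2) ∧ D_select_leaderboard (pvDiffWitness_select_leaderboard.1) (pvDiffWitness_select_leaderboard.2) ∧ select_leaderboard (pvDiffWitness_select_leaderboard.1) (pvDiffWitness_select_leaderboard.2) = pvDiffWitnessOut_select_leaderboard.1 ∧ select_leaderboard_alt (pvDiffWitness_select_leaderboard.1) (pvDiffWitness_select_leaderboard.2) = pvDiffWitnessOut_select_leaderboard.2 ∧ pvDiffWitnessOut_select_leaderboard.1 ≠ pvDiffWitnessOut_select_leaderboard.2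
def Claim_exact_select_leaderboard : Prop := ∀ (leaderboard : List (String × Int)) (n : Int), Dom_select_leaderboard leaderboard n → Pre_select_leaderboard leaderboard n → D_select_leaderboard leaderboard n → select_leaderboard leaderboard n ≠ select_leaderboard_alt leaderboard n

-- ===== LEMMAS AND PROOFS =====

-- A's appending loop is a filter
theorem pvLoopA_eq_filter (t : Int) (l : List (String × Int)) (acc : List (String × Int)) :
    l.foldl (fun acc x => if x.2 ≥ t then acc ++ [(x.1, x.2)] else acc) acc
      = acc ++ l.filter (fun x => decide (t ≤ x.2)) := by
  induction l generalizing acc with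
  | nil => simp
  | cons h tl ih =>
    simp only [List.foldl_cons, List.filter_cons]
    by_cases hc : t ≤ h.2
    · simp [hc, ih]
    · simp [hc, ih, ge_iff_le]

-- once the quota is used up, B keeps exactly the entries tied with the last kept score
theorem pvBLoop_stop (rest : List (String × Int)) (n c v : Int)
    (hnc : n ≤ c)
    (hle : ∀ x ∈ rest, x.2 ≤ v)
    (hp : rest.Pairwise (fun a b => b.2 ≤ a.2)) :
    pvBLoop n c (some v) rest = rest.filter (fun x => decide (v ≤ x.2)) := by
  induction rest generalizing c with
  | nil => simp [pvBLoop]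
  | cons h tl ih =>
    obtain ⟨p, sc⟩ := h
    have hsc : sc ≤ v := hle (p, sc) (by simp)
    simp only [List.pairwise_cons] at hp
    by_cases hv : sc = v
    · subst hv
      simp only [pvBLoop, ne_eq, not_true_eq_false, and_false, if_false]
      rw [List.filter_cons_of_pos (by simp)]
      exact congrArg _ (ih (c + 1) (by omega) (fun x hx => le_trans (hp.1 x hx) le_rfl) hp.2)
    · have hlt : sc < v := lt_of_le_of_ne hsc hv
      simp only [pvBLoop, ne_eq]
      rw [if_pos ⟨hnc, by simp; omega⟩]
      have h1 : decide (v ≤ sc) = false := by simp; omega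
      rw [List.filter_cons_of_neg (by simp; omega)]
      symm
      rw [List.filter_eq_nil_iff]
      intro x hx
      have := hp.1 x hx
      simp; omega

-- while quota remains, B equals the filter by the score at the quota boundary
theorem pvBLoop_eq_filter (s : List (String × Int)) (n c : Int) (pv : Option Int)
    (hc : c < n) (hlen : (n - c).toNat ≤ s.length)
    (hp : s.Pairwise (fun a b => b.2 ≤ a.2)) :
    pvBLoop n c pv s = s.filter (fun x => decide ((s.getD ((n - c - 1).toNat) ("", 0)).2 ≤ x.2)) := by
  induction s generalizing c pv with
  | nil => simp at hlen; omega
  | cons h tl ih =>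
    obtain ⟨p, sc⟩ := h
    simp only [List.pairwise_cons] at hp
    simp only [pvBLoop]
    rw [if_neg (by simp; omega)]
    by_cases hstep : c + 1 < n
    · -- boundary index ≥ 1: threshold lives in the tail
      have hidx : (n - c - 1).toNat = (n - (c + 1) - 1).toNat + 1 := by omega
      have hlen' : (n - (c + 1)).toNat ≤ tl.length := by simp at hlen; omega
      have hget : ((p, sc) :: tl).getD ((n - c - 1).toNat) ("", 0)
          = tl.getD ((n - (c + 1) - 1).toNat) ("", 0) := by
        rw [hidx]; rfl
      rw [hget]
      have hin : (n - (c + 1) - 1).toNat < tl.length := by omega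
      have hmem : tl.getD ((n - (c + 1) - 1).toNat) ("", 0) ∈ tl := by
        rw [List.getD_eq_getElem _ _ hin]; exact List.getElem_mem hin
      have hsc : (tl.getD ((n - (c + 1) - 1).toNat) ("", 0)).2 ≤ sc := hp.1 _ hmem
      rw [List.filter_cons_of_pos (by simp only [decide_eq_true_iff]; exact hsc)]
      exact congrArg _ (ih (c + 1) (some sc) hstep hlen' hp.2)
    · -- boundary reached at the head: threshold is sc, tail handled by pvBLoop_stop
      have hn : n = c + 1 := by omega
      have hidx : (n - c - 1).toNat = 0 := by omega
      rw [hidx]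
      simp only [List.getD_cons_zero]
      rw [List.filter_cons_of_pos (by simp)]
      exact congrArg _ (pvBLoop_stop tl n (c + 1) sc (by omega) hp.1 hp.2)

-- the sorted list has weakly decreasing scores
theorem pvSorted_pairwise (leaderboard : List (String × Int)) :
    (PySem.List.sorted leaderboard (fun x => x.2) true).Pairwise (fun a b => b.2 ≤ a.2) :=
  PySem.List.sorted_pairwise_rev leaderboard (fun x => x.2)

-- ===== VERDICT (by name: the statement is the Claim_ definition above) =====
theorem select_leaderboard_spec : Claim_unchanged_select_leaderboard := by
  intro lb n _ hpre hnd
  unfold select_leaderboard select_leaderboard_alt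
  set s := PySem.List.sorted lb (fun x => x.2) true with hs
  have hlen : s.length = lb.length := PySem.List.length_sorted lb (fun x => x.2) true
  by_cases hb : (s.length : Int) ≤ n
  · simp [hb]
  · rw [if_neg hb, if_neg hb]
    -- n ≥ 1 from ¬D_ and Pre_
    unfold D_select_leaderboard at hnd
    unfold Pre_select_leaderboard at hpre
    have hn1 : 1 ≤ n := by rw [hlen] at hb; omega
    have hnlen : n < (s.length : Int) := by omega
    have hrange : PySem.Raise.InRange s.length (n - 1) := by
      constructor <;> omega
    have hget : PySem.List.pyGet? s (n - 1) = some (s.getD ((n - 1).toNat) ("", 0)) := by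
      rw [PySem.List.pyGet?_of_nonneg _ (by omega)]
      have hin : (n - 1).toNat < s.length := by omega
      rw [List.getElem?_eq_getElem hin, List.getD_eq_getElem _ _ hin]
    rw [hget]
    dsimp only
    rw [pvLoopA_eq_filter, List.nil_append]
    have := pvBLoop_eq_filter s n 0 none (by omega) (by omega) (pvSorted_pairwise lb)
    rw [this]
    norm_num

theorem select_leaderboard_changed : Claim_changed_select_leaderboard := by
  unfold Claim_changed_select_leaderboard; decide

theorem select_leaderboard_tight : Claim_exact_select_leaderboard := by
  intro lb n _ _ hd
  unfold D_select_leaderboard at hd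
  unfold select_leaderboard select_leaderboard_alt
  set s := PySem.List.sorted lb (fun x => x.2) true with hs
  have hlen : s.length = lb.length := PySem.List.length_sorted lb (fun x => x.2) true
  have hb : ¬ ((s.length : Int) ≤ n) := by rw [hlen]; omega
  rw [if_neg hb, if_neg hb]
  -- B returns []
  have hslen : 0 < s.length := by omega
  obtain ⟨⟨p, sc⟩, tl, hcons⟩ : ∃ h tl, s = h :: tl := by
    cases hx : s with
    | nil => rw [hx] at hslen; simp at hslen
    | cons a b => exact ⟨a, b, rfl⟩
  have hB : pvBLoop n 0 none s = [] := by
    rw [hcons]; simp only [pvBLoop]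
    rw [if_pos ⟨by omega, by simp⟩]
  rw [hB]
  -- A returns a nonempty list
  have hrange : PySem.Raise.InRange s.length (n - 1) := by
    constructor <;> omega
  have hne : PySem.List.pyGet? s (n - 1) ≠ none := by
    intro h
    rw [PySem.List.pyGet?_eq_none_iff] at h
    exact h hrange
  obtain ⟨q, hq⟩ := Option.ne_none_iff_exists'.mp hne
  rw [hq]
  dsimp only
  have hmem : q ∈ s := PySem.List.mem_of_pyGet?_eq_some _ hq
  rw [pvLoopA_eq_filter, List.nil_append]
  intro hcontra
  rw [List.filter_eq_nil_iff] at hcontra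
  exact absurd (by simp : decide (q.2 ≤ q.2) = true) (by simpa using hcontra q hmem)
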